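-- pv_equiv track=rewrite | github.com/snipeso/pvt | trigger.py | triggers2id
-- ===== SOURCE A (Python) =====
-- BASE = 63  # this because BrainAmp uses 255 for reset; otherwise would have used 64
--
-- def triggers2id(triggers):
--
--     for pos, trigger in enumerate(triggers):
--         if pos == (len(triggers) - 1):
--             if not trigger - 128 >= 64:
--                 raise ValueError("Last trigger is not a terminating trigger")
--         else:
--             if not trigger - 128 < 64:
--                 raise ValueError("Non-last trigger is a terminating trigger")
--
--     # filter out triggers that are not part of a id-group
--     triggers = filter(lambda x: x >= 128, triggers)
--
--     # flip the leftmost bit back to 0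
--     triggers = [t - 128 for t in triggers]
--
--     # flip the second-to-leftmost bit back to 0
--     triggers = [t % 64 for t in triggers]
--
--     i = 0
--     for pos, n in enumerate(reversed(triggers)):
--         i += n * BASE ** pos
--     return i
-- ===== SOURCE B (Python) =====
-- BASE = 63
--
-- def triggers2id(triggers):
--     for pos, trigger in enumerate(triggers):
--         if pos == (len(triggers) - 1):
--             if not trigger - 128 >= 64:
--                 raise ValueError("Last trigger is not a terminating trigger")
--         else:
--             if not trigger - 128 < 64:
--                 raise ValueError("Non-last trigger is a terminating trigger")
--
--     # single Horner pass: fuse filtering, bit-flipping and base conversion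
--     i = 0
--     for t in triggers:
--         if t >= 128:
--             i = i * BASE + (t - 128) % 64
--     return i
-- ===== Notes on version B (the rewrite author's own statement) =====
-- stated objective: simpler
-- what changed: The three intermediate passes (filter, two maps) and the reversed enumerate with explicit powers BASE**pos are replaced by a single forward Horner pass i = i*BASE + (t-128)%64 over the triggers >= 128.
import Mathlib
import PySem

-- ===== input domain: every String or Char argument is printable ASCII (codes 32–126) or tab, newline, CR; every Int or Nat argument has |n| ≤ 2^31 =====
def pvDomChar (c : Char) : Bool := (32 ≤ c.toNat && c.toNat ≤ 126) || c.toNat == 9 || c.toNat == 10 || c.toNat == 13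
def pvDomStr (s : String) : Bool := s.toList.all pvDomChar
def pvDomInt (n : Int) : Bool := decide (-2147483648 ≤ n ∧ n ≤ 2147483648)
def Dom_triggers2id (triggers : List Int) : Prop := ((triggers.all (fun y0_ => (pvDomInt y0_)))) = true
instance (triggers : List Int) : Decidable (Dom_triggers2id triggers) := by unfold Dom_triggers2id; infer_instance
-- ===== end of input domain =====

-- B replaces A's filter/map/map passes and reversed power sum by one forward Horner pass; same value everywhere inside Pre_.
-- ===== PORT A =====
def triggers2id (triggers : List Int) : Int :=
  let ts1 := triggers.filter (fun x => decide (128 ≤ x))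
  let ts2 := ts1.map (fun t => t - 128)
  let ts3 := ts2.map (fun t => PySem.Int.mod t 64)
  (PySem.List.enumerate ts3.reverse 0).foldl (fun i p => i + p.2 * 63 ^ p.1.toNat) 0

-- ===== PORT B =====
def triggers2id_alt (triggers : List Int) : Int :=
  triggers.foldl (fun i t => if 128 ≤ t then i * 63 + PySem.Int.mod (t - 128) 64 else i) 0

-- ===== PRECONDITION & SPEC =====
-- Pre_ excludes exactly the inputs on which A's validation loop raises ValueError:
-- a non-last trigger ≥ 192 or a nonempty list whose last trigger is < 192.
def Pre_triggers2id (triggers : List Int) : Prop :=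
  (∀ t ∈ triggers.dropLast, t < 192) ∧ (triggers = [] ∨ 192 ≤ triggers.getLastD 0)
instance (triggers : List Int) : Decidable (Pre_triggers2id triggers) := by
  unfold Pre_triggers2id; infer_instance
def pvWitness_triggers2id : List Int := [130, 5, 150, 200]

def Spec_triggers2id (triggers : List Int) (out : Int) : Prop := out = triggers2id_alt triggers
instance (triggers : List Int) (out : Int) : Decidable (Spec_triggers2id triggers out) := by unfold Spec_triggers2id; infer_instance

-- ===== CLAIM (what is proved, stated in full; the proofs are below) =====
def Claim_equal_triggers2id : Prop := ∀ (triggers : List Int), Dom_triggers2id triggers → Pre_triggers2id triggers → Spec_triggers2id triggers (triggers2id triggers)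

-- ===== LEMMAS AND PROOFS =====

-- little-endian polynomial value in base 63
def pvPoly : List Int → Int
  | [] => 0
  | d :: l => d + 63 * pvPoly l

theorem pvPoly_append (l : List Int) (d : Int) :
    pvPoly (l ++ [d]) = pvPoly l + 63 ^ l.length * d := by
  induction l with
  | nil => simp [pvPoly]
  | cons x xs ih => simp [pvPoly, ih, pow_succ]; ring

theorem enum_fold_eq_pvPoly (l : List Int) (s : Nat) (a : Int) :
    (PySem.List.enumerate l (s : Int)).foldl (fun i p => i + p.2 * 63 ^ p.1.toNat) a
      = a + 63 ^ s * pvPoly l := by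
  induction l generalizing s a with
  | nil => simp [PySem.List.enumerate_nil, pvPoly]
  | cons x xs ih =>
    rw [PySem.List.enumerate_cons]
    simp only [List.foldl_cons]
    have : ((s : Int) + 1) = ((s + 1 : Nat) : Int) := by push_cast; ring
    rw [this, ih]
    simp [pvPoly, pow_succ]
    ring

theorem horner_fold_eq_pvPoly (ds : List Int) (a : Int) :
    ds.foldl (fun i d => i * 63 + d) a = a * 63 ^ ds.length + pvPoly ds.reverse := by
  induction ds generalizing a with
  | nil => simp [pvPoly]
  | cons d ds ih =>
    simp only [List.foldl_cons, List.reverse_cons, List.length_cons]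
    rw [ih, pvPoly_append]
    simp [pow_succ]
    ring

theorem alt_fold_eq (ts : List Int) (a : Int) :
    ts.foldl (fun i t => if 128 ≤ t then i * 63 + PySem.Int.mod (t - 128) 64 else i) a
      = (((ts.filter (fun x => decide (128 ≤ x))).map (fun t => t - 128)).map
          (fun t => PySem.Int.mod t 64)).foldl (fun i d => i * 63 + d) a := by
  induction ts generalizing a with
  | nil => rfl
  | cons t ts ih =>
    simp only [List.foldl_cons, List.filter_cons]
    by_cases h : 128 ≤ t
    · simp only [h, decide_true]; exact ih _
    · simp only [h, decide_false]; exact ih _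

-- ===== VERDICT (by name: the statement is the Claim_ definition above) =====
theorem triggers2id_spec : Claim_equal_triggers2id := by
  intro ts _ _
  unfold Spec_triggers2id triggers2id triggers2id_alt
  rw [alt_fold_eq, horner_fold_eq_pvPoly]
  have := enum_fold_eq_pvPoly
    ((((ts.filter (fun x => decide (128 ≤ x))).map (fun t => t - 128)).map
        (fun t => PySem.Int.mod t 64)).reverse) 0 0
  simp at this ⊢
  rw [this]
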